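-- pv_equiv track=rewrite | github.com/jamiejamiebobamie/textGeneration | src/web_functions.py | nOrderMarkov
-- ===== SOURCE A (Python) =====
-- def nOrderMarkov(n,my_quote,words):
--     """
--     """
--     instances = {}
--     if len(my_quote) >= n:
--         target_sequence = my_quote[-n]
--     else:
--         target_sequence = my_quote
--     max_length = 0
--     for i in range(len(words) - 1):
--         j = -1
--         k = i
--         while k >= 0 and k < len(words) and abs(j) <= len(target_sequence):
--             if words[k] == target_sequence[j]:
--                 k-=1
--                 j-=1
--             else:
--                 break
--         match = j < -1
--         if match:
--             # j is a negative index counting from the back of the sequence.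
--             max_length = min(j,max_length)
--             if j <= max_length:
--                 _key = words[i+1]
--                 inInstances = instances.get(_key,False)
--                 if inInstances:
--                     instances[_key]+=1
--                 else:
--                     instances[_key]=1
--     # may be empty.
--     return instances
-- ===== SOURCE B (Python) =====
-- def nOrderMarkov(n, my_quote, words):
--     # Same target selection as the original.
--     if len(my_quote) >= n:
--         target = my_quote[-n]
--     else:
--         target = my_quote
--     m = len(target)
--     N = len(words)
--
--     # Phase 1: depth-wise match-length computation. survivors holds the
--     # positions whose suffix still matches the last d elements of target;
--     # each round filters them against the next-deeper target element and
--     # records the new depth. Stops early once no position survives.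
--     L = [0] * N
--     survivors = list(range(N))
--     d = 0
--     while d < m and survivors:
--         t = target[m - 1 - d]
--         survivors = [i for i in survivors if i >= d and words[i - d] == t]
--         d += 1
--         for i in survivors:
--             L[i] = d
--
--     # Phase 2: single pass selecting record-or-tie matches and counting
--     # their successor words.
--     counts = {}
--     best = 0
--     for i in range(N - 1):
--         Li = L[i]
--         if Li > 0 and Li >= best:
--             best = Li
--             w = words[i + 1]
--             counts[w] = counts.get(w, 0) + 1
--     return counts
-- ===== Notes on version B (the rewrite author's own statement) =====
-- stated objective: alternative
-- what changed: B replaces A's per-position backward two-pointer scan (j,k walk with a negative running record and dict updates interleaved) by a depth-wise level computation: it filters the list of surviving positions once per match depth to produce the whole match-length table, stopping early when no position survives, then a separate record-or-tie selection-and-count pass reads that table.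
import Mathlib
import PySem

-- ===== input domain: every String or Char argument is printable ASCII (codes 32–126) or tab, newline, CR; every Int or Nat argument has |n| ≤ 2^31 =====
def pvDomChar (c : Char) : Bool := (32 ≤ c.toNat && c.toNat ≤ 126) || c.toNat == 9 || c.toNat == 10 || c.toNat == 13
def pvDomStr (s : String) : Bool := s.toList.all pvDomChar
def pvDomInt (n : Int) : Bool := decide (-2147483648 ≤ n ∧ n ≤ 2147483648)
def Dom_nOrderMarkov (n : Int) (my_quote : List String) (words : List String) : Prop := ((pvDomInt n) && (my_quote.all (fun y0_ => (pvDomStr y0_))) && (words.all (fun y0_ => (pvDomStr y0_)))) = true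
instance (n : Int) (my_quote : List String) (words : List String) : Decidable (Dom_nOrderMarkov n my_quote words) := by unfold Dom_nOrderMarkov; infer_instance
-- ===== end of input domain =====

-- B replaces A's per-position backward two-pointer scan by a depth-wise computation of all
-- suffix-match lengths (filtering the list of surviving positions level by level), followed by
-- a separate record-or-tie selection-and-count pass; objective: alternative.

-- ===== PORT A =====
-- target_sequence = my_quote[-n] if len(my_quote) >= n else my_quote.
-- A Python str is its sequence of one-character strings here (indexed and compared elementwise),
-- so it is represented as the list of its one-character strings; [] is unreachable under Pre_ (IndexError).
-- (this helper is the two identical first lines both Pythons start with)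
def pvTarget (n : Int) (my_quote : List String) : List String :=
  if n ≤ (my_quote.length : Int) then
    match PySem.List.pyGet? my_quote (-n) with
    | some s => s.toList.map (fun c => String.ofList [c])
    | none => []
  else my_quote

-- the inner 'while k >= 0 and k < len(words) and abs(j) <= len(target): if words[k] == target[j]: k-=1; j-=1 else: break'
-- (fuel: k decreases each iteration, so i+1 steps always suffice; exhausted fuel returns the state like a failed guard)
def pvAWalk (words target : List String) : Nat → Int → Int → Int × Int
  | 0, j, k => (j, k)
  | fuel+1, j, k =>
    if 0 ≤ k ∧ k < (words.length : Int) ∧ j.natAbs ≤ target.length then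
      if PySem.List.pyGet? words k = PySem.List.pyGet? target j then
        pvAWalk words target fuel (j-1) (k-1)
      else (j, k)
    else (j, k)

-- one iteration of A's 'for i in range(len(words)-1)' over the state (instances, max_length)
def pvAStep (words target : List String) (st : PySem.Dict String Int × Int) (i : Nat) :
    PySem.Dict String Int × Int :=
  let j := (pvAWalk words target (i+1) (-1) (i : Int)).1
  if j < -1 then
    let maxl := min j st.2
    if j ≤ maxl then
      let key := words.getD (i+1) ""      -- i+1 < len(words) for every i the loop visits
      let instances' :=
        match st.1.get? key with          -- instances.get(_key, False) used as a truth value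
        | some v => if v ≠ 0 then st.1.insert key (v + 1) else st.1.insert key 1
        | none => st.1.insert key 1
      (instances', maxl)
    else (st.1, maxl)
  else st

def nOrderMarkov (n : Int) (my_quote : List String) (words : List String) : List (String × Int) :=
  let target := pvTarget n my_quote
  ((List.range (words.length - 1)).foldl (pvAStep words target)
    (PySem.Dict.empty, 0)).1.items

-- ===== PORT B =====
-- 'while d < m and survivors: t = target[m-1-d]; survivors = [i for i in survivors if i >= d and
--  words[i-d] == t]; d += 1; for i in survivors: L[i] = d'
-- (fuel: d increases each round and the loop stops at d = target.length, so target.length steps suffice)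
def pvDepthLoop (words target : List String) : Nat → Nat → List Nat → List Int → List Int
  | 0, _, _, L => L
  | fuel+1, d, survivors, L =>
    if d < target.length ∧ survivors ≠ [] then
      let t := target.getD (target.length - 1 - d) ""
      let surv' := survivors.filter (fun i => decide (d ≤ i ∧ words.getD (i - d) "" = t))
      let L' := surv'.foldl (fun l i => l.set i ((d + 1 : Nat) : Int)) L
      pvDepthLoop words target fuel (d + 1) surv' L'
    else L

-- one iteration of B's selection-and-count pass over the state (counts, best)
def pvSelStep (words : List String) (L : List Int) (st : PySem.Dict String Int × Int) (i : Nat) :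
    PySem.Dict String Int × Int :=
  let Li := L.getD i 0
  if 0 < Li ∧ st.2 ≤ Li then
    (st.1.insert (words.getD (i + 1) "") (st.1.getD (words.getD (i + 1) "") 0 + 1), Li)
  else st

def nOrderMarkov_alt (n : Int) (my_quote : List String) (words : List String) : List (String × Int) :=
  let target := pvTarget n my_quote
  let L := pvDepthLoop words target target.length 0 (List.range words.length)
             (List.replicate words.length 0)
  (((List.range (words.length - 1)).foldl (pvSelStep words L) (PySem.Dict.empty, 0)).1).items

-- ===== PRECONDITION & SPEC =====
-- Pre_ excludes exactly the inputs where Python raises IndexError on my_quote[-n]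
-- (n ≤ 0 with -n ≥ len(my_quote)); both A and B raise there.
def Pre_nOrderMarkov (n : Int) (my_quote : List String) (_words : List String) : Prop :=
  1 ≤ n ∨ -n < (my_quote.length : Int)
instance (n : Int) (my_quote : List String) (words : List String) : Decidable (Pre_nOrderMarkov n my_quote words) := by
  unfold Pre_nOrderMarkov; infer_instance

def pvWitness_nOrderMarkov : Int × List String × List String := (1, ["ab"], ["a", "b", "c", "b", "d"])

def Spec_nOrderMarkov (n : Int) (my_quote : List String) (words : List String) (out : List (String × Int)) : Prop := out = nOrderMarkov_alt n my_quote words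
instance (n : Int) (my_quote : List String) (words : List String) (out : List (String × Int)) : Decidable (Spec_nOrderMarkov n my_quote words out) := by unfold Spec_nOrderMarkov; infer_instance

-- ===== CLAIM (what is proved, stated in full; the proofs are below) =====
def Claim_equal_nOrderMarkov : Prop := ∀ (n : Int) (my_quote : List String) (words : List String), Dom_nOrderMarkov n my_quote words → Pre_nOrderMarkov n my_quote words → Spec_nOrderMarkov n my_quote words (nOrderMarkov n my_quote words)

-- ===== LEMMAS AND PROOFS =====

-- reference match length: the upward-counting loop both sides are measured against
def pvMatchLen (words t_rev : List String) (i : Nat) : Nat → Nat → Nat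
  | 0, L => L
  | fuel+1, L =>
    if L < t_rev.length ∧ L ≤ i ∧ words.getD (i - L) "" = t_rev.getD L "" then
      pvMatchLen words t_rev i fuel (L + 1)
    else L

def pvML (words target : List String) (i : Nat) : Nat :=
  pvMatchLen words target.reverse i (target.length + 1) 0

-- A's negative running record, on B's Int-valued best
def pvNegEncI (x : Int) : Int := if x ≤ 0 then 0 else -(1 + x)

theorem pvAWalk_stop (words target : List String) (fa : Nat) (j k : Int)
    (h : ¬ (0 ≤ k ∧ k < (words.length : Int) ∧ j.natAbs ≤ target.length)) :
    pvAWalk words target fa j k = (j, k) := by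
  cases fa <;> simp [pvAWalk, h]

-- translation of the two loops' element tests into each other
theorem pvGet_trans (words target : List String) (i L : Nat) (hi : i < words.length)
    (h1 : L < target.length) (h2 : L ≤ i) :
    (PySem.List.pyGet? words ((i : Int) - (L : Int)) = PySem.List.pyGet? target (-(1 + (L : Int))))
      ↔ (words.getD (i - L) "" = target.reverse.getD L "") := by
  have hc : (i : Int) - (L : Int) = ((i - L : Nat) : Int) := by omega
  have hL1 : (-(1 + (L : Int))) = -(((L + 1 : Nat) : Int)) := by push_cast; ring
  rw [hc, hL1, PySem.List.pyGet?_natCast, PySem.List.pyGet?_neg_natCast target (L + 1) (by omega) (by omega)]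
  have hlt : i - L < words.length := by omega
  have hlt2 : target.length - (L + 1) < target.length := by omega
  have hLr : L < target.reverse.length := by simpa using h1
  rw [List.getElem?_eq_getElem hlt, List.getElem?_eq_getElem hlt2]
  rw [List.getD_eq_getElem?_getD, List.getD_eq_getElem?_getD,
      List.getElem?_eq_getElem hlt, List.getElem?_eq_getElem hLr]
  simp only [Option.getD_some, Option.some.injEq, List.getElem_reverse]
  constructor <;> intro h <;> rw [h] <;> (congr 1; omega)

-- A's inner walk computes the reference match length (A's j is -(1+L), A's k is i-L)
theorem pvWalk_core (words target : List String) (i : Nat) (hi : i < words.length) :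
    ∀ (fb L fa : Nat), i + 1 - L ≤ fa → target.length - L ≤ fb →
    pvAWalk words target fa (-(1 + (L : Int))) ((i : Int) - (L : Int))
      = (-(1 + (pvMatchLen words target.reverse i fb L : Int)),
         (i : Int) - (pvMatchLen words target.reverse i fb L : Int)) := by
  intro fb
  induction fb with
  | zero =>
    intro L fa hfa hfb
    rw [pvMatchLen]
    apply pvAWalk_stop
    rintro ⟨-, -, h3⟩
    omega
  | succ fb ih =>
    intro L fa hfa hfb
    rw [pvMatchLen]
    by_cases hg : L < target.reverse.length ∧ L ≤ i ∧ words.getD (i - L) "" = target.reverse.getD L ""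
    · rw [if_pos hg]
      obtain ⟨h1, h2, h3⟩ := hg
      rw [List.length_reverse] at h1
      obtain ⟨fa', rfl⟩ : ∃ fa', fa = fa' + 1 := ⟨fa - 1, by omega⟩
      rw [pvAWalk]
      rw [if_pos (by refine ⟨by omega, by omega, ?_⟩; omega)]
      rw [if_pos ((pvGet_trans words target i L hi h1 h2).mpr h3)]
      have e1 : (-(1 + (L : Int)) - 1) = -(1 + ((L + 1 : Nat) : Int)) := by push_cast; ring
      have e2 : ((i : Int) - (L : Int) - 1) = (i : Int) - ((L + 1 : Nat) : Int) := by push_cast; ring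
      rw [e1, e2]
      exact ih (L + 1) fa' (by omega) (by omega)
    · rw [if_neg hg]
      by_cases hm : L < target.length
      · by_cases hli : L ≤ i
        · have h3 : ¬ (words.getD (i - L) "" = target.reverse.getD L "") := by
            intro h; exact hg ⟨by simpa using hm, hli, h⟩
          cases fa with
          | zero => rw [pvAWalk]
          | succ fa' =>
            rw [pvAWalk]
            rw [if_pos (by refine ⟨by omega, by omega, ?_⟩; omega)]
            rw [if_neg (fun h => h3 ((pvGet_trans words target i L hi hm hli).mp h))]
        · exact pvAWalk_stop _ _ _ _ _ (by rintro ⟨h0, -, -⟩; omega)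
      · exact pvAWalk_stop _ _ _ _ _ (by rintro ⟨-, -, h3⟩; omega)

-- the reference loop's result characterised: maximal good prefix
theorem pvMatchLen_invar (words tr : List String) (i : Nat) :
    ∀ (fuel L : Nat), tr.length - L ≤ fuel → L ≤ tr.length →
    (∀ e, e < L → e ≤ i ∧ words.getD (i - e) "" = tr.getD e "") →
      L ≤ pvMatchLen words tr i fuel L ∧
      pvMatchLen words tr i fuel L ≤ tr.length ∧
      (∀ e, e < pvMatchLen words tr i fuel L → e ≤ i ∧ words.getD (i - e) "" = tr.getD e "") ∧
      ¬ (pvMatchLen words tr i fuel L < tr.length ∧ pvMatchLen words tr i fuel L ≤ i ∧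
         words.getD (i - pvMatchLen words tr i fuel L) "" = tr.getD (pvMatchLen words tr i fuel L) "") := by
  intro fuel
  induction fuel with
  | zero =>
    intro L hfuel hle hgood
    rw [pvMatchLen]
    exact ⟨le_refl _, hle, hgood, by rintro ⟨h, -, -⟩; omega⟩
  | succ fuel ih =>
    intro L hfuel hle hgood
    rw [pvMatchLen]
    by_cases hg : L < tr.length ∧ L ≤ i ∧ words.getD (i - L) "" = tr.getD L ""
    · rw [if_pos hg]
      obtain ⟨h1, h2, h3⟩ := hg
      have := ih (L + 1) (by omega) (by omega)
        (by intro e he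
            by_cases heL : e < L
            · exact hgood e heL
            · have : e = L := by omega
              subst this; exact ⟨h2, h3⟩)
      exact ⟨by omega, this.2.1, this.2.2.1, this.2.2.2⟩
    · rw [if_neg hg]
      exact ⟨le_refl _, hle, hgood, hg⟩

theorem pvML_iff (words target : List String) (i d : Nat) :
    d ≤ pvML words target i ↔
      (d ≤ target.length ∧
       ∀ e, e < d → e ≤ i ∧ words.getD (i - e) "" = target.reverse.getD e "") := by
  have hlen : target.reverse.length = target.length := List.length_reverse
  have spec := pvMatchLen_invar words target.reverse i (target.length + 1) 0
    (by omega) (by omega) (by intro e he; omega)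
  rw [hlen] at spec
  unfold pvML
  constructor
  · intro hd
    exact ⟨le_trans hd spec.2.1, fun e he => spec.2.2.1 e (by omega)⟩
  · rintro ⟨hdm, hgood⟩
    by_contra h
    have hML : pvMatchLen words target.reverse i (target.length + 1) 0 < d := Nat.lt_of_not_le h
    exact spec.2.2.2 (by
      refine ⟨by omega, ?_, ?_⟩
      · exact (hgood _ hML).1
      · exact (hgood _ hML).2)

theorem pvML_le (words target : List String) (i : Nat) :
    pvML words target i ≤ target.length :=
  ((pvML_iff words target i (pvML words target i)).mp (le_refl _)).1

theorem pvRevGetD (target : List String) (d : Nat) (hd : d < target.length) :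
    target.reverse.getD d "" = target.getD (target.length - 1 - d) "" := by
  have hdr : d < target.reverse.length := by simpa using hd
  have h2 : target.length - 1 - d < target.length := by omega
  rw [List.getD_eq_getElem?_getD, List.getD_eq_getElem?_getD,
      List.getElem?_eq_getElem hdr, List.getElem?_eq_getElem h2]
  simp [List.getElem_reverse]

theorem pvFoldlSet_length (v : Int) :
    ∀ (S : List Nat) (L : List Int),
      (S.foldl (fun l i => l.set i v) L).length = L.length := by
  intro S
  induction S with
  | nil => intro L; rfl
  | cons a S ih => intro L; simp [List.foldl_cons, ih, List.length_set]

theorem pvFoldlSet_getElem? (v : Int) :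
    ∀ (S : List Nat) (L : List Int) (j : Nat),
      (S.foldl (fun l i => l.set i v) L)[j]?
        = if j ∈ S ∧ j < L.length then some v else L[j]? := by
  intro S
  induction S with
  | nil => intro L j; simp
  | cons a S ih =>
    intro L j
    simp only [List.foldl_cons]
    rw [ih, List.length_set]
    by_cases hc : j ∈ S ∧ j < L.length
    · rw [if_pos hc, if_pos ⟨List.mem_cons_of_mem a hc.1, hc.2⟩]
    · rw [if_neg hc, List.getElem?_set]
      by_cases hja : a = j
      · subst hja
        by_cases hl : a < L.length
        · simp [hl]
        · have hnone : L[a]? = none := List.getElem?_eq_none (by omega)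
          rw [hnone]
          simp [hl]
      · simp only [if_neg hja]
        by_cases hjS : j ∈ S
        · have : ¬ j < L.length := fun hl => hc ⟨hjS, hl⟩
          rw [if_neg (by tauto)]
        · rw [if_neg (by
            rintro ⟨hmem, -⟩
            rcases List.mem_cons.mp hmem with h | h
            · exact hja h.symm
            · exact hjS h)]

theorem pvFoldlSet_getD (v : Int) (S : List Nat) (L : List Int) (j : Nat) :
    (S.foldl (fun l i => l.set i v) L).getD j 0
      = if j ∈ S ∧ j < L.length then v else L.getD j 0 := by
  rw [List.getD_eq_getElem?_getD, List.getD_eq_getElem?_getD, pvFoldlSet_getElem?]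
  split <;> simp

-- B's depth loop computes exactly the reference match lengths
theorem pvDepthLoop_spec (words target : List String) :
    ∀ (fuel d : Nat) (S : List Nat) (L : List Int),
      target.length - d ≤ fuel →
      S = (List.range words.length).filter (fun i => decide (d ≤ pvML words target i)) →
      L.length = words.length →
      (∀ i, i < words.length → L.getD i 0 = ((min (pvML words target i) d : Nat) : Int)) →
      ∀ i, i < words.length →
        (pvDepthLoop words target fuel d S L).getD i 0 = ((pvML words target i : Nat) : Int) := by
  intro fuel
  induction fuel with
  | zero =>
    intro d S L hfuel hS hlen hL i hi
    rw [pvDepthLoop, hL i hi]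
    have := pvML_le words target i
    congr 1
    omega
  | succ fuel ih =>
    intro d S L hfuel hS hlen hL i hi
    rw [pvDepthLoop]
    by_cases hg : d < target.length ∧ S ≠ []
    · rw [if_pos hg]
      obtain ⟨hdm, hSne⟩ := hg
      have hsurv : S.filter (fun i => decide (d ≤ i ∧ words.getD (i - d) "" = target.getD (target.length - 1 - d) ""))
          = (List.range words.length).filter (fun i => decide (d + 1 ≤ pvML words target i)) := by
        rw [hS, List.filter_filter]
        apply List.filter_congr
        intro x hx
        have hxN : x < words.length := List.mem_range.mp hx
        rw [← Bool.decide_and, decide_eq_decide]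
        rw [← pvRevGetD target d hdm]
        constructor
        · rintro ⟨⟨hdx, hmatch⟩, hdML⟩
          rw [pvML_iff]
          refine ⟨hdm, ?_⟩
          intro e he
          by_cases hed : e < d
          · exact ((pvML_iff words target x d).mp hdML).2 e hed
          · have : e = d := by omega
            subst this; exact ⟨hdx, hmatch⟩
        · intro h1
          have := (pvML_iff words target x (d + 1)).mp h1
          exact ⟨⟨(this.2 d (Nat.lt_succ_self d)).1, (this.2 d (Nat.lt_succ_self d)).2⟩,
            Nat.le_of_succ_le h1⟩
      apply ih (d + 1) _ _ (by omega) hsurv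
      · rw [pvFoldlSet_length, hlen]
      · intro j hj
        rw [pvFoldlSet_getD]
        by_cases hmem : d + 1 ≤ pvML words target j
        · rw [if_pos ⟨by
            rw [hsurv]
            simp only [List.mem_filter, List.mem_range, decide_eq_true_eq]
            exact ⟨hj, hmem⟩, by omega⟩]
          congr 1
          omega
        · rw [if_neg (by
            rintro ⟨hjm, -⟩
            rw [hsurv] at hjm
            simp only [List.mem_filter, decide_eq_true_eq] at hjm
            exact hmem hjm.2)]
          rw [hL j hj]
          congr 1
          omega
      · exact hi
    · rw [if_neg hg]
      rw [hL i hi]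
      by_cases hdm : d < target.length
      · have hSe : S = [] := by tauto
        have : ¬ (d ≤ pvML words target i) := by
          intro hd
          have : i ∈ S := by
            rw [hS]; simp [List.mem_filter, List.mem_range, hi, hd]
          rw [hSe] at this
          exact absurd this (List.not_mem_nil)
        congr 1
        omega
      · have := pvML_le words target i
        congr 1
        omega

-- A's dict update (get with default False, truthiness test) is B's counting step
theorem pvDictStep (d : PySem.Dict String Int) (key : String) :
    (match d.get? key with
     | some v => if v ≠ 0 then d.insert key (v + 1) else d.insert key 1
     | none => d.insert key 1)
      = d.insert key (d.getD key 0 + 1) := by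
  rcases h : d.get? key with _ | v
  · rw [PySem.Dict.getD_of_get?_eq_none d 0 h]
    show d.insert key 1 = d.insert key (0 + 1)
    norm_num
  · rw [PySem.Dict.getD_of_get?_eq_some d 0 h]
    show (if v ≠ 0 then d.insert key (v + 1) else d.insert key 1) = d.insert key (v + 1)
    by_cases hv : v = 0
    · subst hv; norm_num
    · rw [if_pos hv]

-- one A-iteration on the encoded state is one B-selection-iteration
theorem pvStep_rel (words target : List String) (Lf : List Int) (i : Nat) (hi : i < words.length)
    (hLf : Lf.getD i 0 = ((pvML words target i : Nat) : Int))
    (dct : PySem.Dict String Int) (b : Int) (hb : 0 ≤ b) :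
    pvAStep words target (dct, pvNegEncI b) i
      = ((pvSelStep words Lf (dct, b) i).1, pvNegEncI (pvSelStep words Lf (dct, b) i).2)
    ∧ 0 ≤ (pvSelStep words Lf (dct, b) i).2 := by
  have hml : pvMatchLen words target.reverse i (target.length + 1) 0 = pvML words target i := rfl
  have hw := pvWalk_core words target i hi (target.length + 1) 0 (i + 1) (by omega) (by omega)
  norm_num at hw
  rw [hml] at hw
  unfold pvAStep pvSelStep
  simp only [hw, hLf]
  rcases Nat.eq_zero_or_pos (pvML words target i) with hM0 | hM
  · rw [hM0]
    norm_num
    exact hb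
  · have hMi : (0 : Int) < ((pvML words target i : Nat) : Int) := by exact_mod_cast hM
    rw [if_pos (show -((pvML words target i : Nat) : Int) + -1 < -1 by omega)]
    have hencM : pvNegEncI ((pvML words target i : Nat) : Int)
        = -((pvML words target i : Nat) : Int) + -1 := by
      unfold pvNegEncI; split_ifs <;> omega
    by_cases hbM : b ≤ ((pvML words target i : Nat) : Int)
    · have hmin : min (-((pvML words target i : Nat) : Int) + -1) (pvNegEncI b)
          = -((pvML words target i : Nat) : Int) + -1 := by
        unfold pvNegEncI; split_ifs <;> omega
      rw [hmin]
      rw [if_pos (show -((pvML words target i : Nat) : Int) + -1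
            ≤ -((pvML words target i : Nat) : Int) + -1 from le_refl _)]
      rw [pvDictStep]
      rw [if_pos (show (0 : Int) < ((pvML words target i : Nat) : Int)
            ∧ b ≤ ((pvML words target i : Nat) : Int) from ⟨hMi, hbM⟩)]
      rw [hencM]
      exact ⟨rfl, by omega⟩
    · have hmin : min (-((pvML words target i : Nat) : Int) + -1) (pvNegEncI b) = pvNegEncI b := by
        unfold pvNegEncI; split_ifs <;> omega
      rw [hmin]
      rw [if_neg (show ¬ (-((pvML words target i : Nat) : Int) + -1 ≤ pvNegEncI b) from by
        unfold pvNegEncI; split_ifs <;> omega)]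
      rw [if_neg (show ¬ ((0 : Int) < ((pvML words target i : Nat) : Int)
            ∧ b ≤ ((pvML words target i : Nat) : Int)) from by rintro ⟨-, h⟩; exact hbM h)]
      exact ⟨rfl, hb⟩

theorem pvFold_rel (words target : List String) (Lf : List Int)
    (hLf : ∀ i, i < words.length → Lf.getD i 0 = ((pvML words target i : Nat) : Int)) :
    ∀ (l : List Nat), (∀ i ∈ l, i < words.length) →
    ∀ (dct : PySem.Dict String Int) (b : Int), 0 ≤ b →
    l.foldl (pvAStep words target) (dct, pvNegEncI b)
      = ((l.foldl (pvSelStep words Lf) (dct, b)).1,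
         pvNegEncI (l.foldl (pvSelStep words Lf) (dct, b)).2)
    ∧ 0 ≤ (l.foldl (pvSelStep words Lf) (dct, b)).2 := by
  intro l
  induction l with
  | nil => intro hl dct b hb; exact ⟨rfl, hb⟩
  | cons x xs ih =>
    intro hl dct b hb
    simp only [List.foldl_cons]
    obtain ⟨hstep, hpos⟩ := pvStep_rel words target Lf x (hl x (by simp)) (hLf x (hl x (by simp))) dct b hb
    rw [hstep]
    exact ih (fun i h => hl i (by simp [h])) _ _ hpos

-- ===== VERDICT (by name: the statement is the Claim_ definition above) =====
theorem nOrderMarkov_spec : Claim_equal_nOrderMarkov := by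
  intro n my_quote words _ _
  unfold Spec_nOrderMarkov
  set target := pvTarget n my_quote with htarget
  have hLf := pvDepthLoop_spec words target target.length 0 (List.range words.length)
    (List.replicate words.length 0) (by omega)
    (by symm; apply List.filter_eq_self.mpr; intro a ha; simp)
    (by simp)
    (by intro i hi; simp)
  have h := pvFold_rel words target _ hLf (List.range (words.length - 1))
    (fun i hmem => by have := List.mem_range.mp hmem; omega) PySem.Dict.empty 0 (le_refl 0)
  have h0 : pvNegEncI 0 = 0 := rfl
  rw [h0] at h
  show ((List.range (words.length - 1)).foldl (pvAStep words target) (PySem.Dict.empty, 0)).1.items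
      = (((List.range (words.length - 1)).foldl (pvSelStep words
            (pvDepthLoop words target target.length 0 (List.range words.length)
              (List.replicate words.length 0))) (PySem.Dict.empty, 0)).1).items
  rw [h.1]
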